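-- pv_equiv track=rewrite | github.com/AiSchool-Admin/quran-miracles | data/pipelines/import_quran.py | _get_juz
-- ===== SOURCE A (Python) =====
-- _JUZ_STARTS: list[tuple[int, int]] = [
--     (1, 1), (2, 142), (2, 253), (3, 93), (4, 24), (4, 148), (5, 83),
--     (6, 111), (7, 88), (8, 41), (9, 93), (11, 6), (12, 53), (15, 1),
--     (17, 1), (18, 75), (21, 1), (23, 1), (25, 21), (27, 56), (29, 46),
--     (33, 31), (36, 28), (39, 32), (41, 47), (46, 1), (51, 31), (58, 1),
--     (66, 1), (67, 1),
-- ]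
--
-- def _get_juz(surah: int, verse: int) -> int:
--     """Compute juz number for a given surah:verse."""
--     juz = 1
--     for i, (s, v) in enumerate(_JUZ_STARTS):
--         if (surah, verse) >= (s, v):
--             juz = i + 1
--         else:
--             break
--     return juz
-- ===== SOURCE B (Python) =====
-- _JUZ_STARTS: list[tuple[int, int]] = [
--     (1, 1), (2, 142), (2, 253), (3, 93), (4, 24), (4, 148), (5, 83),
--     (6, 111), (7, 88), (8, 41), (9, 93), (11, 6), (12, 53), (15, 1),
--     (17, 1), (18, 75), (21, 1), (23, 1), (25, 21), (27, 56), (29, 46),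
--     (33, 31), (36, 28), (39, 32), (41, 47), (46, 1), (51, 31), (58, 1),
--     (66, 1), (67, 1),
-- ]
--
-- def _get_juz(surah: int, verse: int) -> int:
--     """Binary search (bisect_right) over the sorted juz-start table."""
--     key = (surah, verse)
--     lo, hi = 0, len(_JUZ_STARTS)
--     while lo < hi:
--         mid = (lo + hi) // 2
--         if key < _JUZ_STARTS[mid]:
--             hi = mid
--         else:
--             lo = mid + 1
--     return lo if lo else 1
-- ===== Notes on version B (the rewrite author's own statement) =====
-- stated objective: alternative
-- what changed: Replaced the linear enumerate-and-break scan of the juz-start table with a hand-written bisect_right binary search over the sorted table (result clamped to 1 for keys below the first entry, which is what the search naturally returns for juz 1).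
import Mathlib
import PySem

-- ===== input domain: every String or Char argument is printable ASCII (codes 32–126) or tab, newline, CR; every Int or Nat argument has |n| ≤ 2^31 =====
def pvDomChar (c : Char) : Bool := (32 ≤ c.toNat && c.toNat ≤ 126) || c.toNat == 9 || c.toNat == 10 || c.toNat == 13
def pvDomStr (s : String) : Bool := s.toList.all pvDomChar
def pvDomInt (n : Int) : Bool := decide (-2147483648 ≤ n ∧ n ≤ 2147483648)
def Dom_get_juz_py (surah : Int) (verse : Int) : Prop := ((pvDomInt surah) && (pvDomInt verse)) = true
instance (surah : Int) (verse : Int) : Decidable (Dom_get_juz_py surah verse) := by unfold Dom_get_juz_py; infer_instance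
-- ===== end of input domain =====

-- B replaces A's linear enumerate-and-break scan of the juz table with a bisect_right binary search; alternative, not measured faster.

-- ===== PORT A =====
def juzStarts : List (Int × Int) :=
  [(1, 1), (2, 142), (2, 253), (3, 93), (4, 24), (4, 148), (5, 83),
   (6, 111), (7, 88), (8, 41), (9, 93), (11, 6), (12, 53), (15, 1),
   (17, 1), (18, 75), (21, 1), (23, 1), (25, 21), (27, 56), (29, 46),
   (33, 31), (36, 28), (39, 32), (41, 47), (46, 1), (51, 31), (58, 1),
   (66, 1), (67, 1)]

-- A's enumerate-loop with break: carry the running index i and the current juz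
def juzScan (surah verse : Int) : List (Int × Int) → Nat → Int → Int
  | [], _, juz => juz
  | (s, v) :: rest, i, juz =>
    if surah > s ∨ (surah = s ∧ verse ≥ v) then juzScan surah verse rest (i + 1) ((i : Int) + 1)
    else juz

def get_juz_py (surah : Int) (verse : Int) : Int :=
  juzScan surah verse juzStarts 0 1

-- ===== PORT B =====
-- the hand-written bisect_right while-loop of Source B; the fuel argument only makes the
-- loop total (hi - lo shrinks each step, so fuel = initial hi is always enough)
def juzBisect (surah verse : Int) : Nat → Nat → Nat → Nat
  | 0, lo, _ => lo
  | fuel + 1, lo, hi =>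
    if lo < hi then
      if surah < (juzStarts.getD ((lo + hi) / 2) (0, 0)).1 ∨
         (surah = (juzStarts.getD ((lo + hi) / 2) (0, 0)).1 ∧
          verse < (juzStarts.getD ((lo + hi) / 2) (0, 0)).2) then
        juzBisect surah verse fuel lo ((lo + hi) / 2)
      else juzBisect surah verse fuel ((lo + hi) / 2 + 1) hi
    else lo

def get_juz_py_alt (surah : Int) (verse : Int) : Int :=
  let lo := juzBisect surah verse juzStarts.length 0 juzStarts.length
  if lo = 0 then 1 else (lo : Int)

-- ===== PRECONDITION & SPEC =====
def Spec_get_juz_py (surah : Int) (verse : Int) (out : Int) : Prop := out = get_juz_py_alt surah verse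
instance (surah : Int) (verse : Int) (out : Int) : Decidable (Spec_get_juz_py surah verse out) := by unfold Spec_get_juz_py; infer_instance

-- ===== CLAIM (what is proved, stated in full; the proofs are below) =====
def Claim_equal_get_juz_py : Prop := ∀ (surah : Int) (verse : Int), Dom_get_juz_py surah verse → Spec_get_juz_py surah verse (get_juz_py surah verse)

-- ===== LEMMAS AND PROOFS =====

-- "key (surah, verse) is lexicographically below entry p" — the branch test of both ports
def keyLt (surah verse : Int) (p : Int × Int) : Prop :=
  surah < p.1 ∨ (surah = p.1 ∧ verse < p.2)

-- number of leading entries the key is ≥ of (index of the first entry above the key)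
def firstLt (surah verse : Int) : List (Int × Int) → Nat
  | [] => 0
  | p :: rest =>
    if surah < p.1 ∨ (surah = p.1 ∧ verse < p.2) then 0 else firstLt surah verse rest + 1

-- A's loop returns juz unchanged when no entry passes, else i + (count of passing entries)
theorem juzScan_eq (surah verse : Int) (L : List (Int × Int)) (i : Nat) (juz : Int) :
    juzScan surah verse L i juz =
      if firstLt surah verse L = 0 then juz else ((i + firstLt surah verse L : Nat) : Int) := by
  induction L generalizing i juz with
  | nil => simp [juzScan, firstLt]
  | cons p rest ih =>
    obtain ⟨s, v⟩ := p
    rw [juzScan, firstLt]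
    by_cases h : surah < s ∨ (surah = s ∧ verse < v)
    · have h' : ¬ (surah > s ∨ (surah = s ∧ verse ≥ v)) := by omega
      simp only [if_neg h']
      simp [h]
    · have h' : surah > s ∨ (surah = s ∧ verse ≥ v) := by omega
      simp only [if_pos h']
      rw [ih (i + 1)]
      simp only [if_neg h]
      by_cases hc : firstLt surah verse rest = 0 <;> simp [hc] <;> push_cast <;> omega

-- firstLt characterisation: entries below it fail keyLt, the entry at it (if any) satisfies it
theorem firstLt_le (surah verse : Int) (L : List (Int × Int)) :
    firstLt surah verse L ≤ L.length := by
  induction L with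
  | nil => simp [firstLt]
  | cons p rest ih =>
    rw [firstLt]
    split_ifs
    · simp
    · simp only [List.length_cons]; omega

theorem firstLt_below (surah verse : Int) (L : List (Int × Int)) (j : Nat)
    (hj : j < firstLt surah verse L) : ¬ keyLt surah verse (L.getD j (0, 0)) := by
  induction L generalizing j with
  | nil => simp [firstLt] at hj
  | cons p rest ih =>
    rw [firstLt] at hj
    split_ifs at hj with h
    · omega
    · cases j with
      | zero => simpa [keyLt] using h
      | succ k => exact ih k (by omega)

theorem firstLt_at (surah verse : Int) (L : List (Int × Int))
    (h : firstLt surah verse L < L.length) :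
    keyLt surah verse (L.getD (firstLt surah verse L) (0, 0)) := by
  induction L with
  | nil => simp at h
  | cons p rest ih =>
    rw [firstLt] at h ⊢
    by_cases hk : surah < p.1 ∨ (surah = p.1 ∧ verse < p.2)
    · rw [if_pos hk]; simpa [keyLt] using hk
    · rw [if_neg hk] at h ⊢
      simp only [List.length_cons] at h
      simpa using ih (by omega)

-- strict lexicographic order on table entries
def pairLt (p q : Int × Int) : Prop :=
  p.1 < q.1 ∨ (p.1 = q.1 ∧ p.2 < q.2)

theorem juzStarts_chain : List.IsChain pairLt juzStarts := by
  simp only [juzStarts, List.isChain_cons_cons, List.isChain_singleton, pairLt]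
  norm_num

theorem pairLt_trans (a b c : Int × Int) (h1 : pairLt a b) (h2 : pairLt b c) : pairLt a c := by
  unfold pairLt at *; omega

theorem juzStarts_pairwise : List.Pairwise pairLt juzStarts :=
  @List.IsChain.pairwise _ _ _ ⟨pairLt_trans _ _ _⟩ juzStarts_chain

-- the table is strictly increasing along indices
theorem juzStarts_mono (j k : Nat) (hjk : j < k) (hk : k < 30) :
    pairLt (juzStarts.getD j (0, 0)) (juzStarts.getD k (0, 0)) := by
  have hlen : juzStarts.length = 30 := by decide
  have hj' : j < juzStarts.length := by omega
  have hk' : k < juzStarts.length := by omega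
  rw [List.getD_eq_getElem juzStarts (0, 0) hj', List.getD_eq_getElem juzStarts (0, 0) hk']
  exact List.pairwise_iff_getElem.mp juzStarts_pairwise j k hj' hk' hjk

-- keyLt is upward closed along the table
theorem keyLt_mono (surah verse : Int) (j k : Nat) (hjk : j ≤ k) (hk : k < 30)
    (h : keyLt surah verse (juzStarts.getD j (0, 0))) :
    keyLt surah verse (juzStarts.getD k (0, 0)) := by
  rcases Nat.lt_or_ge j k with hlt | hge
  · have := juzStarts_mono j k hlt hk
    unfold pairLt at this
    unfold keyLt at h ⊢
    omega
  · have : j = k := by omega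
    subst this; exact h

-- bisect invariant: the loop keeps "everything left of lo passes, everything from hi on fails"
theorem juzBisect_inv (surah verse : Int) : ∀ fuel lo hi, hi - lo ≤ fuel → lo ≤ hi → hi ≤ 30 →
    (∀ j, j < lo → ¬ keyLt surah verse (juzStarts.getD j (0, 0))) →
    (∀ j, hi ≤ j → j < 30 → keyLt surah verse (juzStarts.getD j (0, 0))) →
    juzBisect surah verse fuel lo hi ≤ 30 ∧
    (∀ j, j < juzBisect surah verse fuel lo hi → ¬ keyLt surah verse (juzStarts.getD j (0, 0))) ∧
    (∀ j, juzBisect surah verse fuel lo hi ≤ j → j < 30 →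
       keyLt surah verse (juzStarts.getD j (0, 0))) := by
  intro fuel
  induction fuel with
  | zero =>
    intro lo hi hn hle h30 hlow hhigh
    have hlh : lo = hi := by omega
    subst hlh
    rw [juzBisect]
    exact ⟨by omega, hlow, hhigh⟩
  | succ fuel ih =>
    intro lo hi hn hle h30 hlow hhigh
    rw [juzBisect]
    by_cases hlt : lo < hi
    · rw [if_pos hlt]
      have hmid1 : lo ≤ (lo + hi) / 2 := by omega
      have hmid2 : (lo + hi) / 2 < hi := by omega
      by_cases hk : surah < (juzStarts.getD ((lo + hi) / 2) (0, 0)).1 ∨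
          (surah = (juzStarts.getD ((lo + hi) / 2) (0, 0)).1 ∧
           verse < (juzStarts.getD ((lo + hi) / 2) (0, 0)).2)
      · rw [if_pos hk]
        exact ih lo ((lo + hi) / 2) (by omega) (by omega) (by omega)
          hlow
          (fun j hj hj30 => keyLt_mono surah verse ((lo + hi) / 2) j hj hj30 hk)
      · rw [if_neg hk]
        refine ih ((lo + hi) / 2 + 1) hi (by omega) (by omega)
          h30 (fun j hj => ?_) hhigh
        rcases Nat.lt_or_ge j lo with hjlo | hjlo
        · exact hlow j hjlo
        · intro hkj
          exact hk (keyLt_mono surah verse j ((lo + hi) / 2) (by omega) (by omega) hkj)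
    · rw [if_neg hlt]
      have hlh : lo = hi := by omega
      subst hlh
      exact ⟨by omega, hlow, hhigh⟩

theorem get_juz_eq (surah verse : Int) : get_juz_py surah verse = get_juz_py_alt surah verse := by
  have hlen : juzStarts.length = 30 := by decide
  -- B's result r
  obtain ⟨hr30, hrlow, hrhigh⟩ :=
    juzBisect_inv surah verse 30 0 30 (by omega) (by omega) (by omega)
      (by omega) (by omega)
  set r := juzBisect surah verse 30 0 30 with hr
  -- A's count c
  set c := firstLt surah verse juzStarts with hc
  have hc30 : c ≤ 30 := by rw [hc, ← hlen]; exact firstLt_le surah verse juzStarts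
  have hrc : r = c := by
    rcases Nat.lt_trichotomy r c with h | h | h
    · exact absurd (firstLt_below surah verse juzStarts r (by omega))
        (not_not_intro (hrhigh r (by omega) (by omega)))
    · exact h
    · exact absurd (firstLt_at surah verse juzStarts (by omega))
        (hrlow c (by omega))
  rw [get_juz_py, get_juz_py_alt, juzScan_eq, hlen]
  simp only [← hr, hrc, ← hc]
  by_cases h0 : c = 0 <;> simp [h0]

-- ===== VERDICT (by name: the statement is the Claim_ definition above) =====
theorem get_juz_py_spec : Claim_equal_get_juz_py := by
  intro surah verse _
  unfold Spec_get_juz_py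
  exact get_juz_eq surah verse
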